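-- pv_equiv track=rewrite | github.com/Shubham-Jaiswal-31/-CrackYourPlacement | Graph/Total number of Spanning Trees in a Graph.py | numOfSpanningTree
-- ===== SOURCE A (Python) =====
-- MAX = 100
--
-- MOD = 1000000007
--
-- def multiply(A, B, C):
--     for i in range(MAX):
--         for j in range(MAX):
--             C[i][j] = 0
--             for k in range(MAX):
--                 C[i][j] = (C[i][j] + (A[i][k] * B[k][j]) % MOD) % MOD
--
-- def power(A, N, result):
--     temp = [[0] * MAX for i in range(MAX)]
--     for i in range(MAX):
--         for j in range(MAX):
--             result[i][j] = 1 if i == j else 0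
--     while N > 0:
--         if N % 2 == 1:
--             multiply(A, result, temp)
--             for i in range(MAX):
--                 for j in range(MAX):
--                     result[i][j] = temp[i][j]
--         N = N // 2
--         multiply(A, A, temp)
--         for i in range(MAX):
--             for j in range(MAX):
--                 A[i][j] = temp[i][j]
--
-- def numOfSpanningTree(graph, V):
--     result = [[0] * MAX for i in range(MAX)]
--     temp = [[0] * MAX for i in range(MAX)]
--
--     for i in range(V):
--         for j in range(V):
--             temp[i][j] = graph[i][j]
--
--     power(temp, V - 2, result)
--     ans = 0
--
--     for i in range(V):
--         for j in range(V):
--             ans = (ans + result[i][j]) % MOD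
--     return ans
-- ===== SOURCE B (Python) =====
-- MOD = 1000000007
--
-- def numOfSpanningTree(graph, V):
--     # iterate the all-ones vector: u <- M*u (V-2 times), answer = sum(u) % MOD
--     u = [1] * V if V > 0 else []
--     for _ in range(V - 2):
--         nu = []
--         for i in range(V):
--             s = 0
--             for k in range(V):
--                 s = (s + graph[i][k] * u[k]) % MOD
--             nu.append(s)
--         u = nu
--     return sum(u) % MOD
-- ===== Notes on version B (the rewrite author's own statement) =====
-- stated objective: simpler
-- what changed: B replaces A's fixed 100x100 matrix binary exponentiation by iterating the all-ones vector V-2 times through the V x V block (computing ones^T * M^(V-2) * ones), so the work depends on V instead of the constant 100^3-per-multiply buffers.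
import Mathlib
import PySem

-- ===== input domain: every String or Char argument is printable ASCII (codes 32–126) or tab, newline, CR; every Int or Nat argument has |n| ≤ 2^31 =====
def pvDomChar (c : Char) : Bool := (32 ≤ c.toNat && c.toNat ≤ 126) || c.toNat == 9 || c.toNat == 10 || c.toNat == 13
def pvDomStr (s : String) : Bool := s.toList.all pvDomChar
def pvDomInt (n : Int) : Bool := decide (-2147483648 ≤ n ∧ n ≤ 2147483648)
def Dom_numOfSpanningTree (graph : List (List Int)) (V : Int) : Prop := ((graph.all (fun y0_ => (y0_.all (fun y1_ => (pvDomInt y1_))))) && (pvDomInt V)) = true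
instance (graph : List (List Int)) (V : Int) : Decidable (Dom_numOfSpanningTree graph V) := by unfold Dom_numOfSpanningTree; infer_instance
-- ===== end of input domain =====

-- B replaces A's fixed 100×100 binary matrix exponentiation by iterating the all-ones
-- vector V-2 times through the V×V block (onesᵀ·M^(V-2)·ones): same value, simpler code.

-- ===== PORT A =====
-- Python's mutable 100×100 matrices are modelled as functions ℕ → ℕ → Int
-- (an element assignment is a pointwise function update); only indices < 100 are read.
abbrev pvMat : Type := Nat → Nat → Int

-- multiply(A, B, C): C[i][j] = Σ_k (C[i][j] + (A[i][k]*B[k][j]) % MOD) % MOD over k in range(MAX)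
def pvMulEntry (A B : pvMat) (i j : Nat) : Int :=
  (List.range 100).foldl
    (fun c k => PySem.Int.mod (c + PySem.Int.mod (A i k * B k j) 1000000007) 1000000007) 0

def pvMultiply (A B : pvMat) : pvMat := fun i j => pvMulEntry A B i j

-- termination measure for the while-loop of power
theorem pvHalf_lt (N : Int) (h : ¬ N ≤ 0) : (PySem.Int.floordiv N 2).toNat < N.toNat := by
  rw [PySem.Int.floordiv_eq_ediv_of_pos (by omega)]
  omega

-- power(A, N, result): result starts as the identity; while N > 0: if N odd, result ← A·result; N ← N//2; A ← A·A
def pvPowerLoop (A result : pvMat) (N : Int) : pvMat :=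
  if h : N ≤ 0 then result
  else
    pvPowerLoop (pvMultiply A A)
      (if PySem.Int.mod N 2 = 1 then pvMultiply A result else result)
      (PySem.Int.floordiv N 2)
termination_by N.toNat
decreasing_by exact pvHalf_lt N h

def pvIdMat : pvMat := fun i j => if i = j then 1 else 0

-- temp[i][j] = graph[i][j] for i, j in range(V), 0 elsewhere
def pvTempA (graph : List (List Int)) (V : Int) : pvMat := fun i j =>
  if (i : Int) < V ∧ (j : Int) < V then
    PySem.List.pyGetD (PySem.List.pyGetD graph (i : Int) []) (j : Int) 0
  else 0

def numOfSpanningTree (graph : List (List Int)) (V : Int) : Int :=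
  let result := pvPowerLoop (pvTempA graph V) pvIdMat (V - 2)
  (PySem.List.pyRange 0 V 1).foldl
    (fun ans i =>
      (PySem.List.pyRange 0 V 1).foldl
        (fun ans j => PySem.Int.mod (ans + result i.toNat j.toNat) 1000000007) ans)
    0

-- ===== PORT B =====
-- one row of M·u: sum over k in range(V) of graph[i][k]*u[k], reduced mod MOD
def pvRowB (graph : List (List Int)) (V : Int) (u : List Int) (i : Int) : Int :=
  (PySem.List.pyRange 0 V 1).foldl
    (fun s k =>
      PySem.Int.mod
        (s + PySem.List.pyGetD (PySem.List.pyGetD graph i []) k 0 * PySem.List.pyGetD u k 0)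
        1000000007) 0

-- one iteration u ← M·u (the inner 'for i in range(V): nu.append(…)')
def pvStepB (graph : List (List Int)) (V : Int) (u : List Int) : List Int :=
  (PySem.List.pyRange 0 V 1).foldl (fun nu i => nu ++ [pvRowB graph V u i]) []

def numOfSpanningTree_alt (graph : List (List Int)) (V : Int) : Int :=
  let u := (PySem.List.pyRange 0 (V - 2) 1).foldl
    (fun u _ => pvStepB graph V u) (List.replicate V.toNat 1)
  PySem.Int.mod u.sum 1000000007

-- ===== PRECONDITION & SPEC =====
-- Pre_ excludes exactly the inputs where A raises IndexError: V must fit in the fixed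
-- 100×100 buffers (V ≤ MAX = 100), and graph must provide the whole V×V block.
def Pre_numOfSpanningTree (graph : List (List Int)) (V : Int) : Prop :=
  V ≤ 100 ∧ V ≤ (graph.length : Int) ∧ ∀ r ∈ graph.take V.toNat, V ≤ (r.length : Int)
instance (graph : List (List Int)) (V : Int) : Decidable (Pre_numOfSpanningTree graph V) := by
  unfold Pre_numOfSpanningTree; infer_instance

def pvWitness_numOfSpanningTree : List (List Int) × Int := ([[0, 1, 1], [1, 0, 1], [1, 1, 0]], 3)

def Spec_numOfSpanningTree (graph : List (List Int)) (V : Int) (out : Int) : Prop := out = numOfSpanningTree_alt graph V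
instance (graph : List (List Int)) (V : Int) (out : Int) : Decidable (Spec_numOfSpanningTree graph V out) := by unfold Spec_numOfSpanningTree; infer_instance

-- ===== CLAIM (what is proved, stated in full; the proofs are below) =====
def Claim_equal_numOfSpanningTree : Prop := ∀ (graph : List (List Int)) (V : Int), Dom_numOfSpanningTree graph V → Pre_numOfSpanningTree graph V → Spec_numOfSpanningTree graph V (numOfSpanningTree graph V)

-- ===== LEMMAS AND PROOFS =====

-- residues modulo MOD
abbrev pvR : Type := ZMod 1000000007

def pvFin (i : Nat) : Fin 100 := ⟨i % 100, by omega⟩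

theorem pvFin_val (i : Nat) (h : i < 100) : (pvFin i : Nat) = i := Nat.mod_eq_of_lt h

-- the 100×100 matrix of residues behind an Int matrix
def pvToM (A : pvMat) : Matrix (Fin 100) (Fin 100) pvR :=
  Matrix.of fun i j => ((A i j : Int) : pvR)

-- the indicator vector of the V×V block (the all-ones vector padded with zeros)
def pvW (n : Nat) : Fin 100 → pvR := fun j => if (j : Nat) < n then 1 else 0

theorem pvCast_mod (a : Int) :
    ((PySem.Int.mod a 1000000007 : Int) : pvR) = (a : pvR) := by
  rw [PySem.Int.mod_eq_emod_of_pos (by norm_num)]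
  have h : a % (1000000007 : Int) = a % ((1000000007 : Nat) : Int) := by norm_num
  rw [h, ZMod.intCast_eq_intCast_iff]
  exact Int.emod_emod_of_dvd a dvd_rfl

theorem pvCast_inj (a b : Int) (ha0 : 0 ≤ a) (ha : a < 1000000007)
    (hb0 : 0 ≤ b) (hb : b < 1000000007) (h : (a : pvR) = (b : pvR)) : a = b := by
  have hm : a % ((1000000007 : Nat) : Int) = b % ((1000000007 : Nat) : Int) :=
    (ZMod.intCast_eq_intCast_iff _ _ _).mp h
  have : ((1000000007 : Nat) : Int) = 1000000007 := by norm_num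
  rw [this, Int.emod_eq_of_lt ha0 ha, Int.emod_eq_of_lt hb0 hb] at hm
  exact hm

theorem pvFold1_cast (m : Nat) (f : Nat → Int) (c : Int) :
    (((List.range m).foldl (fun s k => PySem.Int.mod (s + f k) 1000000007) c : Int) : pvR)
      = (c : pvR) + ∑ k ∈ Finset.range m, ((f k : Int) : pvR) := by
  induction m with
  | zero => simp
  | succ m ih =>
    rw [List.range_succ, List.foldl_append, Finset.sum_range_succ]
    simp only [List.foldl_cons, List.foldl_nil]
    rw [pvCast_mod]
    push_cast
    rw [ih]
    ring

theorem pvFold1_bounds (m : Nat) (f : Nat → Int) (c : Int)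
    (h0 : 0 ≤ c) (h1 : c < 1000000007) :
    0 ≤ (List.range m).foldl (fun s k => PySem.Int.mod (s + f k) 1000000007) c ∧
      (List.range m).foldl (fun s k => PySem.Int.mod (s + f k) 1000000007) c < 1000000007 := by
  induction m with
  | zero => exact ⟨h0, h1⟩
  | succ m ih =>
    rw [List.range_succ, List.foldl_append]
    simp only [List.foldl_cons, List.foldl_nil]
    exact ⟨PySem.Int.mod_nonneg _ (by norm_num), PySem.Int.mod_lt _ (by norm_num)⟩

theorem pvFold2_cast (m1 m2 : Nat) (g : Nat → Nat → Int) (c : Int) :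
    (((List.range m1).foldl
        (fun a i => (List.range m2).foldl (fun a j => PySem.Int.mod (a + g i j) 1000000007) a) c
        : Int) : pvR)
      = (c : pvR) + ∑ i ∈ Finset.range m1, ∑ j ∈ Finset.range m2, ((g i j : Int) : pvR) := by
  induction m1 with
  | zero => simp
  | succ m ih =>
    rw [List.range_succ, List.foldl_append, Finset.sum_range_succ]
    simp only [List.foldl_cons, List.foldl_nil]
    rw [pvFold1_cast, ih]
    ring

theorem pvFold2_bounds (m1 m2 : Nat) (g : Nat → Nat → Int) (c : Int)
    (h0 : 0 ≤ c) (h1 : c < 1000000007) :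
    0 ≤ (List.range m1).foldl
        (fun a i => (List.range m2).foldl (fun a j => PySem.Int.mod (a + g i j) 1000000007) a) c ∧
      (List.range m1).foldl
        (fun a i => (List.range m2).foldl (fun a j => PySem.Int.mod (a + g i j) 1000000007) a) c
        < 1000000007 := by
  induction m1 with
  | zero => exact ⟨h0, h1⟩
  | succ m ih =>
    rw [List.range_succ, List.foldl_append]
    simp only [List.foldl_cons, List.foldl_nil]
    exact pvFold1_bounds m2 _ _ ih.1 ih.2

set_option maxRecDepth 4096 in
theorem pvToM_multiply (A B : pvMat) : pvToM (pvMultiply A B) = pvToM A * pvToM B := by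
  ext i j
  rw [Matrix.mul_apply]
  show ((pvMulEntry A B i j : Int) : pvR) = _
  unfold pvMulEntry
  rw [pvFold1_cast]
  have hR : (∑ k : Fin 100, pvToM A i k * pvToM B k j)
      = ∑ k ∈ Finset.range 100, ((A (i : Nat) k : Int) : pvR) * ((B k (j : Nat) : Int) : pvR) := by
    rw [← Fin.sum_univ_eq_sum_range
      (fun k => ((A (i : Nat) k : Int) : pvR) * ((B k (j : Nat) : Int) : pvR)) 100]
    exact Finset.sum_congr rfl (fun k _ => rfl)
  rw [hR, Int.cast_zero, zero_add]
  refine Finset.sum_congr rfl (fun k hk => ?_)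
  rw [pvCast_mod]
  push_cast
  ring

theorem pvToM_id : pvToM pvIdMat = 1 := by
  ext i j
  by_cases h : i = j
  · simp [pvToM, pvIdMat, Matrix.one_apply, h]
  · have hv : (i : Nat) ≠ (j : Nat) := fun hc => h (Fin.ext hc)
    simp [pvToM, pvIdMat, h, hv]

theorem pvPowerLoop_toM (n : Nat) : ∀ (N : Int), N.toNat = n → ∀ (A res : pvMat),
    pvToM (pvPowerLoop A res N) = (pvToM A) ^ n * pvToM res := by
  induction n using Nat.strong_induction_on with
  | _ n ih =>
    intro N hN A res
    rw [pvPowerLoop]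
    by_cases h : N ≤ 0
    · rw [dif_pos h]
      have : n = 0 := by omega
      rw [this, pow_zero, one_mul]
    · rw [dif_neg h]
      have hNpos : 0 < N := by omega
      have hhalf : (PySem.Int.floordiv N 2).toNat < n := hN ▸ pvHalf_lt N h
      have hfd : PySem.Int.floordiv N 2 = N / 2 := PySem.Int.floordiv_eq_ediv_of_pos (by omega)
      have hmd : PySem.Int.mod N 2 = N % 2 := PySem.Int.mod_eq_emod_of_pos (by omega)
      rw [ih _ hhalf _ rfl, pvToM_multiply]
      by_cases hodd : PySem.Int.mod N 2 = 1
      · have hn : n = 2 * (PySem.Int.floordiv N 2).toNat + 1 := by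
          rw [hmd] at hodd; rw [hfd]; omega
        rw [if_pos hodd, pvToM_multiply, hn,
          show (pvToM A * pvToM A) ^ (PySem.Int.floordiv N 2).toNat
            = pvToM A ^ (2 * (PySem.Int.floordiv N 2).toNat) by rw [pow_mul, sq],
          ← mul_assoc, ← pow_succ]
      · have hn : n = 2 * (PySem.Int.floordiv N 2).toNat := by
          rw [hmd] at hodd
          rw [hfd]; omega
        rw [if_neg hodd, hn,
          show (pvToM A * pvToM A) ^ (PySem.Int.floordiv N 2).toNat
            = pvToM A ^ (2 * (PySem.Int.floordiv N 2).toNat) by rw [pow_mul, sq]]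

-- a sum over all of Fin 100 collapses to the V×V block when terms vanish outside it
theorem pvSum_cut (n : Nat) (hn : n ≤ 100) (x y : Fin 100 → pvR)
    (h0 : ∀ k : Fin 100, n ≤ (k : Nat) → x k * y k = 0) :
    ∑ k : Fin 100, x k * y k = ∑ k ∈ Finset.range n, x (pvFin k) * y (pvFin k) := by
  have h1 : ∑ k : Fin 100, x k * y k
      = ∑ k ∈ Finset.range 100, x (pvFin k) * y (pvFin k) := by
    rw [← Fin.sum_univ_eq_sum_range (fun k => x (pvFin k) * y (pvFin k)) 100]
    refine Finset.sum_congr rfl (fun k _ => ?_)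
    have : pvFin (k : Nat) = k := Fin.ext (pvFin_val _ k.isLt)
    rw [this]
  rw [h1]
  refine (Finset.sum_subset (fun x hx => Finset.mem_range.mpr (lt_of_lt_of_le (Finset.mem_range.mp hx) hn)) (fun k hk hkn => ?_)).symm
  have hk100 := Finset.mem_range.mp hk
  have hkn' : n ≤ k := by
    by_contra hc
    exact hkn (Finset.mem_range.mpr (by omega))
  exact h0 (pvFin k) (by rw [pvFin_val k hk100]; exact hkn')

theorem pvIterate_foldl (s : List Int → List Int) (l : List Int) (u0 : List Int) :
    l.foldl (fun u _ => s u) u0 = s^[l.length] u0 := by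
  induction l generalizing u0 with
  | nil => rfl
  | cons a t ih => simp [List.foldl_cons, ih, Function.iterate_succ_apply]

theorem pvSum_cast (u : List Int) :
    ((u.sum : Int) : pvR) = ∑ i ∈ Finset.range u.length, ((u.getD i 0 : Int) : pvR) := by
  induction u with
  | nil => simp
  | cons a t ih =>
    rw [List.sum_cons, List.length_cons, Finset.sum_range_succ', Int.cast_add, ih]
    simp [add_comm]

-- loop invariant of B: after t iterations u is (M^t)·w on the V×V block
theorem pvB_inv (graph : List (List Int)) (V : Int) (hV100 : V ≤ 100) (t : Nat) :
    ((pvStepB graph V)^[t] (List.replicate V.toNat 1)).length = V.toNat ∧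
    ∀ i, i < V.toNat →
      ((((pvStepB graph V)^[t] (List.replicate V.toNat 1)).getD i 0 : Int) : pvR)
        = ((pvToM (pvTempA graph V) ^ t).mulVec (pvW V.toNat)) (pvFin i) := by
  induction t with
  | zero =>
    refine ⟨List.length_replicate, fun i hi => ?_⟩
    rw [Function.iterate_zero_apply, List.getD_eq_getElem _ _ (by simpa using hi)]
    simp only [List.getElem_replicate, pow_zero, Matrix.one_mulVec]
    rw [pvW]
    rw [if_pos (by rwa [pvFin_val i (by omega)])]
    norm_num
  | succ t ih =>
    obtain ⟨hlen, hu⟩ := ih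
    set u := (pvStepB graph V)^[t] (List.replicate V.toNat 1) with hudef
    have hstep : (pvStepB graph V)^[t+1] (List.replicate V.toNat 1) = pvStepB graph V u := by
      rw [Function.iterate_succ_apply']
    have hmap : pvStepB graph V u
        = (List.range V.toNat).map (fun i : Nat => pvRowB graph V u (i : Int)) := by
      unfold pvStepB
      rw [show (PySem.List.pyRange 0 V 1 : List Int)
            = (List.range V.toNat).map (fun k : Nat => (k : Int)) from PySem.List.pyRange_zero V]
      rw [List.foldl_map]
      rw [show (List.foldl (fun nu (i : Nat) => nu ++ [pvRowB graph V u (i : Int)])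
            [] (List.range V.toNat))
          = [] ++ (List.range V.toNat).map (fun i : Nat => pvRowB graph V u (i : Int)) from
          PySem.List.foldl_append_singleton_eq_map _ _ _]
      rw [List.nil_append]
    rw [hstep, hmap]
    refine ⟨by simp, fun i hi => ?_⟩
    rw [PySem.List.getD_map_range _ _ _ _ hi]
    -- left side: the row value
    have hrow : ((pvRowB graph V u (i : Int) : Int) : pvR)
        = ∑ k ∈ Finset.range V.toNat,
            ((PySem.List.pyGetD (PySem.List.pyGetD graph (i : Int) []) (k : Int) 0 : Int) : pvR)
              * ((u.getD k 0 : Int) : pvR) := by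
      unfold pvRowB
      rw [show (PySem.List.pyRange 0 V 1 : List Int)
            = (List.range V.toNat).map (fun k : Nat => (k : Int)) from PySem.List.pyRange_zero V]
      rw [List.foldl_map]
      rw [pvFold1_cast V.toNat
        (fun k => PySem.List.pyGetD (PySem.List.pyGetD graph (i : Int) []) (k : Int) 0
          * PySem.List.pyGetD u (k : Int) 0) 0]
      rw [Int.cast_zero, zero_add]
      refine Finset.sum_congr rfl (fun k hk => ?_)
      rw [PySem.List.pyGetD_natCast u k 0]
      push_cast
      ring
    rw [hrow]
    -- right side: one mulVec step
    rw [pow_succ', ← Matrix.mulVec_mulVec]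
    have hmv : (pvToM (pvTempA graph V)).mulVec ((pvToM (pvTempA graph V) ^ t).mulVec (pvW V.toNat)) (pvFin i)
        = ∑ k : Fin 100, pvToM (pvTempA graph V) (pvFin i) k
            * ((pvToM (pvTempA graph V) ^ t).mulVec (pvW V.toNat)) k := by
      simp [Matrix.mulVec, dotProduct]
    rw [hmv]
    rw [pvSum_cut V.toNat (by omega) _ _ (fun k hk => ?_)]
    · refine (Finset.sum_congr rfl (fun k hk => ?_)).symm
      have hkn : k < V.toNat := Finset.mem_range.mp hk
      have hiv : (pvFin i : Nat) = i := pvFin_val i (by omega)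
      have hkv : (pvFin k : Nat) = k := pvFin_val k (by omega)
      have htemp : pvToM (pvTempA graph V) (pvFin i) (pvFin k)
          = ((PySem.List.pyGetD (PySem.List.pyGetD graph (i : Int) []) (k : Int) 0 : Int) : pvR) := by
        show ((pvTempA graph V (pvFin i : Nat) (pvFin k : Nat) : Int) : pvR) = _
        rw [hiv, hkv]
        unfold pvTempA
        rw [if_pos ⟨by omega, by omega⟩]
      rw [htemp, hu k hkn]
    · -- entries outside the block vanish
      have : pvToM (pvTempA graph V) (pvFin i) k = 0 := by
        show ((pvTempA graph V (pvFin i : Nat) (k : Nat) : Int) : pvR) = 0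
        unfold pvTempA
        rw [if_neg (fun hc => by omega)]
        norm_num
      rw [this, zero_mul]

-- the core equality, from which the verdict follows
theorem pvMain (graph : List (List Int)) (V : Int) (hPre : Pre_numOfSpanningTree graph V) :
    numOfSpanningTree graph V = numOfSpanningTree_alt graph V := by
  obtain ⟨hV100, hlen, hrow⟩ := hPre
  have hn100 : V.toNat ≤ 100 := by omega
  -- A's value
  have hA : numOfSpanningTree graph V
      = (List.range V.toNat).foldl
          (fun a i => (List.range V.toNat).foldl
            (fun a j => PySem.Int.mod
              (a + pvPowerLoop (pvTempA graph V) pvIdMat (V - 2) i j) 1000000007) a) 0 := by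
    simp only [numOfSpanningTree, PySem.List.pyRange_zero, List.foldl_map, Int.toNat_natCast]
  have hres : pvToM (pvPowerLoop (pvTempA graph V) pvIdMat (V - 2)) = (pvToM (pvTempA graph V)) ^ ((V - 2).toNat) := by
    rw [pvPowerLoop_toM ((V - 2).toNat) (V - 2) rfl, pvToM_id, mul_one]
  have hAcast : ((numOfSpanningTree graph V : Int) : pvR)
      = ∑ i ∈ Finset.range V.toNat, ∑ j ∈ Finset.range V.toNat, ((pvToM (pvTempA graph V)) ^ ((V - 2).toNat)) (pvFin i) (pvFin j) := by
    rw [hA, pvFold2_cast, Int.cast_zero, zero_add]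
    refine Finset.sum_congr rfl (fun i hi => Finset.sum_congr rfl (fun j hj => ?_))
    have hi' := Finset.mem_range.mp hi
    have hj' := Finset.mem_range.mp hj
    have := congrFun (congrFun hres (pvFin i)) (pvFin j)
    rw [← this]
    show _ = ((pvPowerLoop (pvTempA graph V) pvIdMat (V - 2) (pvFin i : Nat) (pvFin j : Nat) : Int) : pvR)
    rw [pvFin_val i (by omega), pvFin_val j (by omega)]
  have hAbounds := pvFold2_bounds V.toNat V.toNat
    (fun i j => pvPowerLoop (pvTempA graph V) pvIdMat (V - 2) i j) 0 (by norm_num) (by norm_num)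
  rw [← hA] at hAbounds
  -- B's value
  have hBdef : numOfSpanningTree_alt graph V
      = PySem.Int.mod ((pvStepB graph V)^[((V - 2).toNat)] (List.replicate V.toNat 1)).sum 1000000007 := by
    unfold numOfSpanningTree_alt
    rw [pvIterate_foldl, PySem.List.length_pyRange_one]
    norm_num
  obtain ⟨hblen, hbentry⟩ := pvB_inv graph V hV100 ((V - 2).toNat)
  have hBcast : ((numOfSpanningTree_alt graph V : Int) : pvR)
      = ∑ i ∈ Finset.range V.toNat, (((pvToM (pvTempA graph V)) ^ ((V - 2).toNat)).mulVec (pvW V.toNat)) (pvFin i) := by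
    rw [hBdef, pvCast_mod, pvSum_cast, hblen]
    exact Finset.sum_congr rfl (fun i hi => hbentry i (Finset.mem_range.mp hi))
  -- the two residues agree
  have hsum : ∑ i ∈ Finset.range V.toNat, (((pvToM (pvTempA graph V)) ^ ((V - 2).toNat)).mulVec (pvW V.toNat)) (pvFin i)
      = ∑ i ∈ Finset.range V.toNat, ∑ j ∈ Finset.range V.toNat, ((pvToM (pvTempA graph V)) ^ ((V - 2).toNat)) (pvFin i) (pvFin j) := by
    refine Finset.sum_congr rfl (fun i hi => ?_)
    have hmv : (((pvToM (pvTempA graph V)) ^ ((V - 2).toNat)).mulVec (pvW V.toNat)) (pvFin i)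
        = ∑ k : Fin 100, ((pvToM (pvTempA graph V)) ^ ((V - 2).toNat)) (pvFin i) k * pvW V.toNat k := by
      simp [Matrix.mulVec, dotProduct]
    rw [hmv, pvSum_cut V.toNat hn100 _ _ (fun k hk => by
      rw [pvW, if_neg (by omega), mul_zero])]
    refine Finset.sum_congr rfl (fun j hj => ?_)
    have hj' := Finset.mem_range.mp hj
    rw [pvW, if_pos (by rw [pvFin_val j (by omega)]; exact hj'), mul_one]
  have hmodb0 : 0 ≤ numOfSpanningTree_alt graph V := by
    rw [hBdef]; exact PySem.Int.mod_nonneg _ (by norm_num)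
  have hmodb1 : numOfSpanningTree_alt graph V < 1000000007 := by
    rw [hBdef]; exact PySem.Int.mod_lt _ (by norm_num)
  exact pvCast_inj _ _ hAbounds.1 hAbounds.2 hmodb0 hmodb1 (by rw [hAcast, hBcast, hsum])

-- ===== VERDICT (by name: the statement is the Claim_ definition above) =====
theorem numOfSpanningTree_spec : Claim_equal_numOfSpanningTree := by
  intro graph V _hDom hPre
  unfold Spec_numOfSpanningTree
  exact pvMain graph V hPre
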